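-- pv_equiv track=rewrite | github.com/TilenG2/Programiranje1 | Domace_Naloge/DN5_test.py | pretvori_zemljevid
-- ===== SOURCE A (Python) =====
-- def pretvori_vrstico(vrstica):
--     x = 1
--     seznam = []
--     block = False
--     vrstica += '.'
--     for c in vrstica:
--         if c == '#' and not block:
--             x1 = x
--             block = True
--         if block and c == '.':
--             seznam.append((x1, x-1))
--             block = False
--         x += 1
--     return seznam
--
-- def dodaj_vrstico(bloki, y):
--     seznam = []
--     for coords in bloki:
--         x0, x1 = coords
--         seznam.append((x0, x1, y))
--     return seznam
--
-- def pretvori_zemljevid(zemljevid):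
--     ovire = []
--     y = 1
--     for vrstica in zemljevid:
--         seznam = pretvori_vrstico(vrstica)
--         if seznam != []:
--             for coords in dodaj_vrstico(seznam, y):
--                 ovire.append(coords)
--         y += 1
--     return ovire
-- ===== SOURCE B (Python) =====
-- def pretvori_zemljevid(zemljevid):
--     ovire = []
--     for y, vrstica in enumerate(zemljevid, 1):
--         pos = 0
--         for chunk in vrstica.split('.'):
--             i = chunk.find('#')
--             if i != -1:
--                 ovire.append((pos + i + 1, pos + len(chunk), y))
--             pos += len(chunk) + 1
--     return ovire
-- ===== Notes on version B (the rewrite author's own statement) =====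
-- stated objective: simpler
-- what changed: Replaces the char-by-char flag state machine with its sentinel-'.' trick and two helper functions by a single enumerate loop that splits each row on '.' and records, per chunk containing a '#', the span from its first '#' to the chunk end.
import Mathlib
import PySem

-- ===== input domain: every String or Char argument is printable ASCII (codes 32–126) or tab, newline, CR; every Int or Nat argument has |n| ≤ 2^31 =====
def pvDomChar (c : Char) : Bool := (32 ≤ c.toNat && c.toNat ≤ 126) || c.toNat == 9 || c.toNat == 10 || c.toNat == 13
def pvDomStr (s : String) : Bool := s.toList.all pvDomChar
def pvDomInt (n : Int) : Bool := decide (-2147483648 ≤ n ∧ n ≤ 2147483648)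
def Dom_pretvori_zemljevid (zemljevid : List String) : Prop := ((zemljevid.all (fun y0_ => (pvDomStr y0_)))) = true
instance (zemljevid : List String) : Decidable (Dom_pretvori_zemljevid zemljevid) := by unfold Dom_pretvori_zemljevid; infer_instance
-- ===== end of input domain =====

-- B replaces A's char-by-char flag state machine (and its sentinel-'.' trick and two helper
-- functions) by one pass that splits each row on '.' and reads the first '#' of each chunk:
-- a simpler, more idiomatic decomposition with the same cost.

-- ===== PORT A =====
-- the body of A's inner `for c in vrstica` loop (state: x, seznam, block, x1)
def pvStepA (st : Int × List (Int × Int) × Bool × Int) (c : Char) :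
    Int × List (Int × Int) × Bool × Int :=
  let x := st.1
  let seznam := st.2.1
  let block := st.2.2.1
  let x1 := st.2.2.2
  let x1 := if c = '#' ∧ block = false then x else x1
  let block := if c = '#' ∧ block = false then true else block
  let seznam := if block = true ∧ c = '.' then seznam ++ [(x1, x - 1)] else seznam
  let block := if block = true ∧ c = '.' then false else block
  (x + 1, seznam, block, x1)

def pretvoriVrstico (vrstica : String) : List (Int × Int) :=
  ((vrstica.toList ++ ['.']).foldl pvStepA (1, [], false, 0)).2.1

def dodajVrstico (bloki : List (Int × Int)) (y : Int) : List (Int × Int × Int) :=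
  bloki.foldl (fun seznam coords => seznam ++ [(coords.1, coords.2, y)]) []

def pretvori_zemljevid (zemljevid : List String) : List (Int × Int × Int) :=
  (zemljevid.foldl
    (fun (st : List (Int × Int × Int) × Int) vrstica =>
      let ovire := st.1
      let y := st.2
      let seznam := pretvoriVrstico vrstica
      let ovire :=
        if seznam ≠ [] then
          (dodajVrstico seznam y).foldl (fun o coords => o ++ [coords]) ovire
        else ovire
      (ovire, y + 1))
    ([], 1)).1

-- ===== PORT B =====
-- the body of B's inner `for chunk in vrstica.split('.')` loop (state: pos, ovire)
def pvStepB (y : Int) (st : Int × List (Int × Int × Int)) (chunk : List Char) :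
    Int × List (Int × Int × Int) :=
  let pos := st.1
  let ovire := st.2
  let i := PySem.Chars.find chunk ['#']
  let ovire := if i ≠ -1 then ovire ++ [(pos + i + 1, pos + PySem.Chars.len chunk, y)] else ovire
  (pos + PySem.Chars.len chunk + 1, ovire)

def pretvori_zemljevid_alt (zemljevid : List String) : List (Int × Int × Int) :=
  (PySem.List.enumerate zemljevid 1).foldl
    (fun ovire yv =>
      ((PySem.Chars.splitOn yv.2.toList ['.']).foldl (pvStepB yv.1) (0, ovire)).2)
    []

-- ===== PRECONDITION & SPEC =====
def Spec_pretvori_zemljevid (zemljevid : List String) (out : List (Int × Int × Int)) : Prop := out = pretvori_zemljevid_alt zemljevid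
instance (zemljevid : List String) (out : List (Int × Int × Int)) : Decidable (Spec_pretvori_zemljevid zemljevid out) := by unfold Spec_pretvori_zemljevid; infer_instance

-- ===== CLAIM (what is proved, stated in full; the proofs are below) =====
def Claim_equal_pretvori_zemljevid : Prop := ∀ (zemljevid : List String), Dom_pretvori_zemljevid zemljevid → Spec_pretvori_zemljevid zemljevid (pretvori_zemljevid zemljevid)

-- ===== LEMMAS AND PROOFS =====

-- splitting a row on '.' as a structural recursion
def cleanSplit : List Char → List (List Char)
  | [] => [[]]
  | c :: rest =>
    if c = '.' then [] :: cleanSplit rest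
    else
      match cleanSplit rest with
      | [] => [[c]]
      | h :: t => (c :: h) :: t

def consHead (p : List Char) : List (List Char) → List (List Char)
  | [] => [p]
  | h :: t => (p ++ h) :: t

-- the spans one dot-free chunk contributes, and the spans of a list of chunks
def chunkSpan (chunk : List Char) (pos : Int) : List (Int × Int) :=
  if '#' ∈ chunk then [(pos + (chunk.idxOf '#' : Int) + 1, pos + chunk.length)] else []

def spansChunks : List (List Char) → Int → List (Int × Int)
  | [], _ => []
  | ch :: t, pos => chunkSpan ch pos ++ spansChunks t (pos + ch.length + 1)

lemma cleanSplit_ne_nil (l : List Char) : cleanSplit l ≠ [] := by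
  cases l with
  | nil => simp [cleanSplit]
  | cons c rest =>
    simp only [cleanSplit]
    split
    · simp
    · split <;> simp

lemma splitOn_go_clean (l : List Char) : ∀ (fuel : Nat) (cur : List Char)
    (acc : List (List Char)), l.length < fuel →
    PySem.Chars.splitOn.go ['.'] fuel l cur acc
      = acc.reverse ++ consHead cur.reverse (cleanSplit l) := by
  induction l with
  | nil =>
    intro fuel cur acc h
    match fuel with
    | fuel + 1 =>
      rw [PySem.Chars.splitOn.go.eq_def]
      simp [cleanSplit, consHead]
  | cons c rest ih =>
    intro fuel cur acc h
    match fuel with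
    | fuel + 1 =>
      rw [PySem.Chars.splitOn.go.eq_def]
      simp only [List.isPrefixOf, Bool.and_true]
      by_cases hc : c = '.'
      · subst hc
        simp only [beq_self_eq_true, if_pos]
        simp only [List.length_cons, List.length_nil, List.drop_succ_cons, List.drop_zero]
        rw [ih fuel [] (cur.reverse :: acc) (by simpa using Nat.lt_of_succ_lt_succ h)]
        simp only [cleanSplit, consHead, List.reverse_cons, List.reverse_nil, List.nil_append,
          List.append_assoc, List.cons_append]
        cases hcr : cleanSplit rest with
        | nil => exact absurd hcr (cleanSplit_ne_nil rest)
        | cons a t => simp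
      · rw [if_neg (by simp [beq_iff_eq]; exact fun hh => hc hh.symm)]
        rw [ih fuel (c :: cur) acc (Nat.lt_of_succ_lt_succ h)]
        simp only [cleanSplit, if_neg hc]
        cases hcr : cleanSplit rest with
        | nil => exact absurd hcr (cleanSplit_ne_nil rest)
        | cons h t => simp [consHead]

lemma splitOn_eq_clean (l : List Char) :
    PySem.Chars.splitOn l ['.'] = cleanSplit l := by
  rw [PySem.Chars.splitOn]
  rw [splitOn_go_clean l (l.length + 1) [] [] (Nat.lt_succ_self _)]
  cases hcl : cleanSplit l with
  | nil => exact absurd hcl (cleanSplit_ne_nil l)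
  | cons h t => simp [consHead]

lemma clean_no_dot (l : List Char) (h : '.' ∉ l) : cleanSplit l = [l] := by
  induction l with
  | nil => rfl
  | cons c rest ih =>
    simp only [List.mem_cons, not_or] at h
    have hc : c ≠ '.' := fun e => h.1 e.symm
    simp only [cleanSplit, if_neg hc]
    rw [ih h.2]

lemma clean_append (c rest : List Char) (h : '.' ∉ c) :
    cleanSplit (c ++ '.' :: rest) = c :: cleanSplit rest := by
  induction c with
  | nil => simp [cleanSplit]
  | cons a t ih =>
    simp only [List.mem_cons, not_or] at h
    have ha : a ≠ '.' := fun e => h.1 e.symm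
    simp only [List.cons_append, cleanSplit]
    rw [if_neg ha, ih h.2]

-- per-character behaviour of A's step
lemma stepA_false_hash (x : Int) (acc : List (Int × Int)) (x1 : Int) :
    pvStepA (x, acc, false, x1) '#' = (x + 1, acc, true, x) := by
  simp [pvStepA]

lemma stepA_false_dot (x : Int) (acc : List (Int × Int)) (x1 : Int) :
    pvStepA (x, acc, false, x1) '.' = (x + 1, acc, false, x1) := by
  simp [pvStepA]

lemma stepA_false_other (c : Char) (hc : c ≠ '.') (hh : c ≠ '#')
    (x : Int) (acc : List (Int × Int)) (x1 : Int) :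
    pvStepA (x, acc, false, x1) c = (x + 1, acc, false, x1) := by
  simp [pvStepA, hc, hh]

lemma stepA_true_dot (x : Int) (acc : List (Int × Int)) (x1 : Int) :
    pvStepA (x, acc, true, x1) '.' = (x + 1, acc ++ [(x1, x - 1)], false, x1) := by
  simp [pvStepA]

lemma stepA_true_other (c : Char) (hc : c ≠ '.')
    (x : Int) (acc : List (Int × Int)) (x1 : Int) :
    pvStepA (x, acc, true, x1) c = (x + 1, acc, true, x1) := by
  simp [pvStepA, hc]

lemma find_go_spec (l : List Char) : ∀ (k : Nat),
    PySem.Chars.find.go ['#'] l k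
      = if '#' ∈ l then ((k + l.idxOf '#' : Nat) : Int) else -1 := by
  induction l with
  | nil => intro k; rw [PySem.Chars.find.go.eq_def]; simp
  | cons c rest ih =>
    intro k
    rw [PySem.Chars.find.go.eq_def]
    dsimp only
    by_cases hc : c = '#'
    · subst hc
      rw [if_pos (by simp [List.isPrefixOf])]
      simp
    · have hpre : List.isPrefixOf ['#'] (c :: rest) = false := by
        simp [List.isPrefixOf]
        exact fun e => hc e.symm
      rw [if_neg (by simp [hpre]), ih (k + 1)]
      have hidx : List.idxOf '#' (c :: rest) = List.idxOf '#' rest + 1 := by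
        simp [hc]
      by_cases hm : '#' ∈ rest
      · rw [if_pos hm, if_pos (List.mem_cons.mpr (Or.inr hm)), hidx]
        push_cast
        ring
      · rw [if_neg hm, if_neg (by simp [hm]; exact fun e => hc e.symm)]

lemma find_singleton (chunk : List Char) :
    PySem.Chars.find chunk ['#']
      = if '#' ∈ chunk then ((chunk.idxOf '#' : Nat) : Int) else -1 := by
  rw [PySem.Chars.find, find_go_spec]
  simp

lemma int_shift (x : Int) (n : Nat) : x + 1 + (n : Int) = x + ((n : Int) + 1) := by ring

-- the head of dropWhile (≠ '.') is '.'
lemma dropWhile_head_dot : ∀ (l : List Char) (a : Char) (t : List Char),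
    List.dropWhile (fun ch => decide (ch ≠ '.')) l = a :: t → a = '.' := by
  intro l
  induction l with
  | nil => intro a t h; simp [List.dropWhile] at h
  | cons c r ih =>
    intro a t h
    by_cases hc : c = '.'
    · subst hc
      simp [List.dropWhile] at h
      exact h.1.symm
    · rw [List.dropWhile_cons_of_pos (by simp [hc])] at h
      exact ih a t h

-- A's state machine on a dot-free chunk
lemma foldA_block (chunk : List Char) (h : '.' ∉ chunk) :
    ∀ (x : Int) (acc : List (Int × Int)) (x1 : Int),
      chunk.foldl pvStepA (x, acc, true, x1) = (x + chunk.length, acc, true, x1) := by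
  induction chunk with
  | nil => intro x acc x1; simp
  | cons c rest ih =>
    intro x acc x1
    simp only [List.mem_cons, not_or] at h
    have hc : c ≠ '.' := fun e => h.1 e.symm
    rw [List.foldl_cons, stepA_true_other c hc, ih h.2, List.length_cons]
    push_cast
    rw [int_shift]

lemma foldA_nohash (chunk : List Char) (h : '.' ∉ chunk) (h2 : '#' ∉ chunk) :
    ∀ (x : Int) (acc : List (Int × Int)) (x1 : Int),
      chunk.foldl pvStepA (x, acc, false, x1) = (x + chunk.length, acc, false, x1) := by
  induction chunk with
  | nil => intro x acc x1; simp
  | cons c rest ih =>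
    intro x acc x1
    simp only [List.mem_cons, not_or] at h h2
    have hc : c ≠ '.' := fun e => h.1 e.symm
    have hh : c ≠ '#' := fun e => h2.1 e.symm
    rw [List.foldl_cons, stepA_false_other c hc hh, ih h.2 h2.2, List.length_cons]
    push_cast
    rw [int_shift]

lemma foldA_hash (chunk : List Char) (h : '.' ∉ chunk) (h2 : '#' ∈ chunk) :
    ∀ (x : Int) (acc : List (Int × Int)) (x1 : Int),
      chunk.foldl pvStepA (x, acc, false, x1)
        = (x + chunk.length, acc, true, x + (chunk.idxOf '#' : Int)) := by
  induction chunk with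
  | nil => intro x acc x1; simp at h2
  | cons c rest ih =>
    intro x acc x1
    simp only [List.mem_cons, not_or] at h
    have hc : c ≠ '.' := fun e => h.1 e.symm
    by_cases hh : c = '#'
    · subst hh
      rw [List.foldl_cons, stepA_false_hash, foldA_block rest h.2]
      have h0 : List.idxOf '#' ('#' :: rest) = 0 := by simp
      rw [h0, List.length_cons]
      push_cast [add_zero]
      rw [int_shift]
    · have hm : '#' ∈ rest := by
        rcases List.mem_cons.mp h2 with h' | h'
        · exact absurd h'.symm hh
        · exact h'
      have hidx : List.idxOf '#' (c :: rest) = List.idxOf '#' rest + 1 := by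
        simp [hh]
      rw [List.foldl_cons, stepA_false_other c hc hh, ih h.2 hm, hidx, List.length_cons]
      push_cast
      rw [int_shift x rest.length, int_shift x (List.idxOf '#' rest)]

-- The bridge: A's fold over (l ++ ['.']) from a closed state computes the chunk spans.
lemma bridgeGen : ∀ (n : Nat) (l : List Char), l.length = n →
    ∀ (x : Int) (acc : List (Int × Int)) (x1 : Int),
      ((l ++ ['.']).foldl pvStepA (x, acc, false, x1)).2.1
        = acc ++ spansChunks (cleanSplit l) (x - 1) := by
  intro n
  induction n using Nat.strong_induction_on with
  | _ n ih =>
    intro l hl x acc x1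
    by_cases hd : '.' ∈ l
    · -- l = c ++ '.' :: r with '.' ∉ c
      have hdec := List.takeWhile_append_dropWhile (p := fun ch => decide (ch ≠ '.')) (l := l)
      cases hdd : List.dropWhile (fun ch => decide (ch ≠ '.')) l with
      | nil =>
        exfalso
        rw [hdd, List.append_nil] at hdec
        have hmem : '.' ∈ List.takeWhile (fun ch => decide (ch ≠ '.')) l := by
          rw [hdec]; exact hd
        have := List.mem_takeWhile_imp hmem
        simp at this
      | cons a r =>
        have ha : a = '.' := dropWhile_head_dot l a r hdd
        subst ha
        have hcnd : '.' ∉ List.takeWhile (fun ch => decide (ch ≠ '.')) l := by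
          intro hmem
          have := List.mem_takeWhile_imp hmem
          simp at this
        set c := List.takeWhile (fun ch => decide (ch ≠ '.')) l with hcdef
        have hl' : l = c ++ '.' :: r := by rw [← hdec, hdd]
        have hlen : c.length + 1 + r.length = n := by
          rw [← hl, hl']
          simp
          omega
        have hstep : ((l ++ ['.']).foldl pvStepA (x, acc, false, x1))
            = ((r ++ ['.']).foldl pvStepA (pvStepA (c.foldl pvStepA (x, acc, false, x1)) '.')) := by
          rw [hl']
          simp [List.foldl_append]
        rw [hstep, hl', clean_append c r hcnd]
        by_cases hm : '#' ∈ c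
        · rw [foldA_hash c hcnd hm, stepA_true_dot,
            ih r.length (by omega) r rfl]
          simp only [spansChunks, chunkSpan, if_pos hm, List.append_assoc,
            List.cons_append, List.nil_append]
          have e1 : x + (c.idxOf '#' : Int) = (x - 1) + (c.idxOf '#' : Int) + 1 := by ring
          have e2 : x + (c.length : Int) - 1 = (x - 1) + (c.length : Int) := by ring
          have e3 : x + (c.length : Int) + 1 - 1 = (x - 1) + (c.length : Int) + 1 := by ring
          rw [e1, e2, e3]
        · rw [foldA_nohash c hcnd hm, stepA_false_dot,
            ih r.length (by omega) r rfl]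
          simp only [spansChunks, chunkSpan, if_neg hm, List.nil_append]
          have e3 : x + (c.length : Int) + 1 - 1 = (x - 1) + (c.length : Int) + 1 := by ring
          rw [e3]
    · -- no dot in l: a single chunk
      rw [clean_no_dot l hd, List.foldl_append]
      by_cases hm : '#' ∈ l
      · rw [foldA_hash l hd hm, List.foldl_cons, List.foldl_nil, stepA_true_dot]
        simp only [spansChunks, chunkSpan, if_pos hm, List.append_nil]
        have e1 : x + (l.idxOf '#' : Int) = (x - 1) + (l.idxOf '#' : Int) + 1 := by ring
        have e2 : x + (l.length : Int) - 1 = (x - 1) + (l.length : Int) := by ring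
        rw [e1, e2]
      · rw [foldA_nohash l hd hm, List.foldl_cons, List.foldl_nil, stepA_false_dot]
        simp [spansChunks, chunkSpan, hm]

lemma row_spec (s : String) :
    pretvoriVrstico s = spansChunks (cleanSplit s.toList) 0 := by
  rw [pretvoriVrstico, bridgeGen s.toList.length s.toList rfl 1 [] 0]
  norm_num

lemma dodaj_spec (bl : List (Int × Int)) (y : Int) :
    dodajVrstico bl y = bl.map (fun p => (p.1, p.2, y)) := by
  rw [dodajVrstico]
  exact PySem.List.foldl_append_singleton_eq_map (fun p => (p.1, p.2, y)) bl []

lemma foldB_spec (chunks : List (List Char)) (y : Int) :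
    ∀ (pos : Int) (ovire : List (Int × Int × Int)),
      (chunks.foldl (pvStepB y) (pos, ovire)).2
        = ovire ++ (spansChunks chunks pos).map (fun p => (p.1, p.2, y)) := by
  induction chunks with
  | nil => intro pos ovire; simp [spansChunks]
  | cons ch t ih =>
    intro pos ovire
    simp only [List.foldl_cons, pvStepB, find_singleton, PySem.Chars.len_eq]
    by_cases hm : '#' ∈ ch
    · rw [if_pos hm]
      rw [if_pos (by omega : ¬ ((ch.idxOf '#' : Int) = -1))]
      rw [ih]
      simp [spansChunks, chunkSpan, hm, List.append_assoc]
    · rw [if_neg hm]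
      rw [if_neg (by simp)]
      rw [ih]
      simp [spansChunks, chunkSpan, hm]

lemma outer_spec (rows : List String) :
    ∀ (y : Int) (ovire : List (Int × Int × Int)),
      ((rows.foldl
        (fun (st : List (Int × Int × Int) × Int) vrstica =>
          let ovire := st.1
          let y := st.2
          let seznam := pretvoriVrstico vrstica
          let ovire :=
            if seznam ≠ [] then
              (dodajVrstico seznam y).foldl (fun o coords => o ++ [coords]) ovire
            else ovire
          (ovire, y + 1)) (ovire, y)).1)
        = (PySem.List.enumerate rows y).foldl
            (fun ovire yv =>
              ((PySem.Chars.splitOn yv.2.toList ['.']).foldl (pvStepB yv.1) (0, ovire)).2)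
            ovire := by
  induction rows with
  | nil => intro y ovire; simp [PySem.List.enumerate]
  | cons r t ih =>
    intro y ovire
    rw [PySem.List.enumerate_cons]
    simp only [List.foldl_cons]
    rw [ih]
    congr 1
    rw [splitOn_eq_clean, foldB_spec, row_spec]
    by_cases hnil : spansChunks (cleanSplit r.toList) 0 = []
    · simp [hnil]
    · rw [if_pos hnil]
      rw [PySem.List.foldl_append_singleton, dodaj_spec]

-- ===== VERDICT (by name: the statement is the Claim_ definition above) =====
theorem pretvori_zemljevid_spec : Claim_equal_pretvori_zemljevid := by
  intro zemljevid _
  unfold Spec_pretvori_zemljevid pretvori_zemljevid pretvori_zemljevid_alt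
  rw [outer_spec]
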